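-- pv_equiv track=rewrite | github.com/stroncis/aiua6-receipt-parser | src/stored_data.py | fuzzy_match_address
-- ===== SOURCE A (Python) =====
-- def fuzzy_match_address(address, known_addresses, threshold=3):
--     # Simple Levenshtein distance (can use rapidfuzz or python-Levenshtein for speed)
--     def levenshtein(a, b):
--         if len(a) < len(b):
--             return levenshtein(b, a)
--         if len(b) == 0:
--             return len(a)
--         previous_row = range(len(b) + 1)
--         for i, c1 in enumerate(a):
--             current_row = [i + 1]
--             for j, c2 in enumerate(b):
--                 insertions = previous_row[j + 1] + 1
--                 deletions = current_row[j] + 1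
--                 substitutions = previous_row[j] + (c1 != c2)
--                 current_row.append(min(insertions, deletions, substitutions))
--             previous_row = current_row
--         return previous_row[-1]
--     matches = [
--         (entry, levenshtein(address, entry["address"]))
--         for entry in known_addresses if "address" in entry
--     ]
--     matches.sort(key=lambda x: x[1])
--     if matches and matches[0][1] <= threshold:
--         return matches[0][0]
--     return None
-- ===== SOURCE B (Python) =====
-- def fuzzy_match_address(address, known_addresses, threshold=3):
--     # Transposed two-row Levenshtein (rows over the second string, no argument
--     # swap, no special empty case) + single linear min-scan keeping the first
--     # minimum, instead of building, sorting and indexing a distance list.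
--     def lev(a, b):
--         cur = list(range(len(a) + 1))
--         for j, cb in enumerate(b):
--             prev, cur = cur, [j + 1]
--             for i, ca in enumerate(a):
--                 cur.append(min(prev[i + 1] + 1, cur[i] + 1, prev[i] + (ca != cb)))
--         return cur[-1]
--     best = None
--     best_d = None
--     for entry in known_addresses:
--         if "address" in entry:
--             d = lev(address, entry["address"])
--             if best_d is None or d < best_d:
--                 best, best_d = entry, d
--     if best is not None and best_d <= threshold:
--         return best
--     return None
-- ===== Notes on version B (the rewrite author's own statement) =====
-- stated objective: alternative
-- what changed: The Levenshtein helper becomes a transposed two-row DP iterating over the second string (no argument swap, no empty-string special case), and the build-list/sort/index selection is replaced by a single linear scan keeping the first entry with minimal distance.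
import Mathlib
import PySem

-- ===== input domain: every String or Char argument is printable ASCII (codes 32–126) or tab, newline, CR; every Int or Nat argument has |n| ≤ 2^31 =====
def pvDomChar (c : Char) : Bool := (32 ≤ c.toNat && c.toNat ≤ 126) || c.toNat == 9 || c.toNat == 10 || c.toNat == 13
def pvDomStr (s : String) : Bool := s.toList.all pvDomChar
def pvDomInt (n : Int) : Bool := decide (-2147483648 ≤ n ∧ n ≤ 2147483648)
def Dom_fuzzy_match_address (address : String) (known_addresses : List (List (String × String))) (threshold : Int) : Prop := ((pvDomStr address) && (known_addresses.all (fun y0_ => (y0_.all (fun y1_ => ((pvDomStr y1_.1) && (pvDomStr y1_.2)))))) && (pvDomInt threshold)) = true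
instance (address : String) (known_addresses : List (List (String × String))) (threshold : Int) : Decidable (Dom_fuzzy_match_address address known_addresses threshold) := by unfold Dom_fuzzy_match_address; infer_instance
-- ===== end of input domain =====

-- B replaces A's argument-swapping row DP over the first string by a transposed two-row DP
-- over the second string (no swap, no empty special case) and replaces A's build-sort-index
-- selection by a single linear scan keeping the first minimum: an alternative decomposition,
-- same asymptotic cost.

-- ===== PORT A =====
-- A's nested `levenshtein`: swaps so the longer string comes first, rows over the first string.
def pvLevA (a b : List Char) : Int :=
  if h : a.length < b.length then pvLevA b a
  else if b.length = 0 then (a.length : Int)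
  else
    let previous_row : List Int := PySem.List.pyRange 0 ((b.length : Int) + 1) 1
    let final := (PySem.List.enumerate a 0).foldl
      (fun previous_row p =>
        (PySem.List.enumerate b 0).foldl
          (fun current_row q =>
            let insertions := PySem.List.pyGetD previous_row (q.1 + 1) 0 + 1
            let deletions := PySem.List.pyGetD current_row q.1 0 + 1
            let substitutions := PySem.List.pyGetD previous_row q.1 0 + (if p.2 ≠ q.2 then (1 : Int) else 0)
            current_row ++ [min (min insertions deletions) substitutions])
          [p.1 + 1])
      previous_row
    PySem.List.pyGetD final (-1) 0
termination_by (if a.length < b.length then 1 else 0)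
decreasing_by simp only [if_pos h, if_neg (by omega : ¬ b.length < a.length)]; omega

def fuzzy_match_address (address : String) (known_addresses : List (List (String × String))) (threshold : Int) : Option (List (String × String)) :=
  let ms0 := known_addresses.foldl
    (fun acc entry =>
      if PySem.Dict.contains (PySem.Dict.mk entry) "address" then
        acc ++ [(entry, pvLevA address.toList ((PySem.Dict.getD (PySem.Dict.mk entry) "address" "").toList))]
      else acc) []
  let ms := PySem.List.sorted ms0 (fun x => x.2) false
  if ms ≠ [] ∧ (PySem.List.pyGetD ms 0 ([], 0)).2 ≤ threshold then
    some (PySem.List.pyGetD ms 0 ([], 0)).1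
  else none

-- ===== PORT B =====
-- B's `lev`: transposed DP, rows over the second string, no swap, no special cases.
def pvLevB (a b : List Char) : Int :=
  let cur : List Int := PySem.List.pyRange 0 ((a.length : Int) + 1) 1
  let final := (PySem.List.enumerate b 0).foldl
    (fun prev q =>
      (PySem.List.enumerate a 0).foldl
        (fun cur p =>
          cur ++ [min (min (PySem.List.pyGetD prev (p.1 + 1) 0 + 1) (PySem.List.pyGetD cur p.1 0 + 1)) (PySem.List.pyGetD prev p.1 0 + (if p.2 ≠ q.2 then (1 : Int) else 0))])
        [q.1 + 1])
    cur
  PySem.List.pyGetD final (-1) 0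

def fuzzy_match_address_alt (address : String) (known_addresses : List (List (String × String))) (threshold : Int) : Option (List (String × String)) :=
  let st := known_addresses.foldl
    (fun (st : Option (List (String × String)) × Option Int) entry =>
      if PySem.Dict.contains (PySem.Dict.mk entry) "address" then
        let d := pvLevB address.toList ((PySem.Dict.getD (PySem.Dict.mk entry) "address" "").toList)
        if st.2.isNone ∨ d < st.2.getD 0 then (some entry, some d) else st
      else st) (none, none)
  if st.1.isSome ∧ st.2.getD 0 ≤ threshold then st.1 else none

-- ===== PRECONDITION & SPEC =====
def Spec_fuzzy_match_address (address : String) (known_addresses : List (List (String × String))) (threshold : Int) (out : Option (List (String × String))) : Prop := out = fuzzy_match_address_alt address known_addresses threshold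
instance (address : String) (known_addresses : List (List (String × String))) (threshold : Int) (out : Option (List (String × String))) : Decidable (Spec_fuzzy_match_address address known_addresses threshold out) := by unfold Spec_fuzzy_match_address; infer_instance

-- ===== CLAIM (what is proved, stated in full; the proofs are below) =====
def Claim_equal_fuzzy_match_address : Prop := ∀ (address : String) (known_addresses : List (List (String × String))) (threshold : Int), Dom_fuzzy_match_address address known_addresses threshold → Spec_fuzzy_match_address address known_addresses threshold (fuzzy_match_address address known_addresses threshold)

-- ===== LEMMAS AND PROOFS =====

-- Reference edit distance (head recursion), matching the DP cell recurrence on reversed prefixes.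
def pvEd : List Char → List Char → Int
  | [], ys => (ys.length : Int)
  | _ :: xs, [] => (xs.length : Int) + 1
  | x :: xs, y :: ys =>
    min (min (pvEd xs (y :: ys) + 1) (pvEd (x :: xs) ys + 1)) (pvEd xs ys + (if x ≠ y then (1 : Int) else 0))
termination_by a b => a.length + b.length

lemma pvEd_nil_right (xs : List Char) : pvEd xs [] = (xs.length : Int) := by
  cases xs <;> simp [pvEd]

lemma pvCost_comm (x y : Char) : (if x ≠ y then (1 : Int) else 0) = (if y ≠ x then (1 : Int) else 0) := by
  by_cases h : x = y <;> simp [h, Ne, eq_comm]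

lemma pvEd_symm (a : List Char) : ∀ b, pvEd a b = pvEd b a := by
  induction a with
  | nil => intro b; cases b <;> simp [pvEd, pvEd_nil_right]
  | cons x xs ih =>
    intro b
    induction b with
    | nil => simp [pvEd, pvEd_nil_right]
    | cons y ys ih2 =>
      rw [pvEd, pvEd, ih (y :: ys), ih2, ih ys, pvCost_comm]
      omega

-- The ideal row after consuming reversed prefix `ra` of the outer string: entries for j = 0..t.
def pvIdeal (ra : List Char) (v : List Char) (t : Nat) : List Int :=
  (List.range (t + 1)).map (fun j => pvEd ra ((v.take j).reverse))

lemma pvIdeal_init (v : List Char) :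
    PySem.List.pyRange 0 ((v.length : Int) + 1) 1 = pvIdeal [] v v.length := by
  rw [PySem.List.pyRange_one, pvIdeal]
  have : ((v.length : Int) + 1 - 0).toNat = v.length + 1 := by omega
  rw [this]
  refine List.map_congr_left ?_
  intro j hj
  rw [List.mem_range] at hj
  simp [pvEd]
  omega

lemma pvInner (cf : Char → Char → Int) (hcf : ∀ x y, cf x y = if x ≠ y then (1 : Int) else 0)
    (v ra : List Char) (c : Char) :
    ∀ (rest bp : List Char), bp ++ rest = v →
    (PySem.List.enumerate rest (bp.length : Int)).foldl
      (fun cur q =>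
        cur ++ [min (min (PySem.List.pyGetD (pvIdeal ra v v.length) (q.1 + 1) 0 + 1) (PySem.List.pyGetD cur q.1 0 + 1)) (PySem.List.pyGetD (pvIdeal ra v v.length) q.1 0 + cf c q.2)])
      (pvIdeal (c :: ra) v bp.length)
    = pvIdeal (c :: ra) v v.length := by
  intro rest
  induction rest with
  | nil =>
    intro bp hbp
    simp at hbp
    subst hbp
    simp [PySem.List.enumerate]
  | cons d rest ih =>
    intro bp hbp
    have hlen : bp.length < v.length := by
      subst hbp; simp
    rw [PySem.List.enumerate_cons, List.foldl_cons]
    have htake : v.take bp.length = bp := by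
      subst hbp; simp
    have htake1 : v.take (bp.length + 1) = bp ++ [d] := by
      subst hbp; rw [List.take_append]; simp
    have hstep :
        pvIdeal (c :: ra) v bp.length ++ [min (min (PySem.List.pyGetD (pvIdeal ra v v.length) ((bp.length : Int) + 1) 0 + 1) (PySem.List.pyGetD (pvIdeal (c :: ra) v bp.length) (bp.length : Int) 0 + 1)) (PySem.List.pyGetD (pvIdeal ra v v.length) (bp.length : Int) 0 + cf c d)]
        = pvIdeal (c :: ra) v (bp.length + 1) := by
      have h1 : PySem.List.pyGetD (pvIdeal ra v v.length) ((bp.length : Int) + 1) 0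
          = pvEd ra ((v.take (bp.length + 1)).reverse) := by
        have : ((bp.length : Int) + 1) = ((bp.length + 1 : Nat) : Int) := by push_cast; ring
        rw [this, PySem.List.pyGetD_natCast, pvIdeal, PySem.List.getD_map_range _ _ _ _ (by omega)]
      have h2 : PySem.List.pyGetD (pvIdeal (c :: ra) v bp.length) (bp.length : Int) 0
          = pvEd (c :: ra) ((v.take bp.length).reverse) := by
        rw [PySem.List.pyGetD_natCast, pvIdeal, PySem.List.getD_map_range _ _ _ _ (by omega)]
      have h3 : PySem.List.pyGetD (pvIdeal ra v v.length) (bp.length : Int) 0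
          = pvEd ra ((v.take bp.length).reverse) := by
        rw [PySem.List.pyGetD_natCast, pvIdeal, PySem.List.getD_map_range _ _ _ _ (by omega)]
      rw [h1, h2, h3, htake, htake1, hcf]
      have hrev : (bp ++ [d]).reverse = d :: bp.reverse := by simp
      rw [hrev]
      have hcell : min (min (pvEd ra (d :: bp.reverse) + 1) (pvEd (c :: ra) bp.reverse + 1)) (pvEd ra bp.reverse + (if c ≠ d then (1 : Int) else 0))
          = pvEd (c :: ra) (d :: bp.reverse) := by
        rw [pvEd]
      rw [hcell, pvIdeal, pvIdeal]
      conv_rhs => rw [List.range_succ]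
      rw [List.map_append, List.map_singleton, htake1]
      simp
    rw [hstep]
    have hlen1 : ((bp.length : Int) + 1) = (((bp ++ [d]).length : Nat) : Int) := by simp
    rw [hlen1]
    have := ih (bp ++ [d]) (by simpa using hbp)
    simpa using this

lemma pvOuter (cf : Char → Char → Int) (hcf : ∀ x y, cf x y = if x ≠ y then (1 : Int) else 0)
    (v : List Char) :
    ∀ (rest : List Char) (ra : List Char) (s : Int), s = (ra.length : Int) →
    (PySem.List.enumerate rest s).foldl
      (fun prev p =>
        (PySem.List.enumerate v 0).foldl
          (fun cur q =>
            cur ++ [min (min (PySem.List.pyGetD prev (q.1 + 1) 0 + 1) (PySem.List.pyGetD cur q.1 0 + 1)) (PySem.List.pyGetD prev q.1 0 + cf p.2 q.2)])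
          [p.1 + 1])
      (pvIdeal ra v v.length)
    = pvIdeal (rest.reverse ++ ra) v v.length := by
  intro rest
  induction rest with
  | nil => intro ra s hs; simp [PySem.List.enumerate]
  | cons c rest ih =>
    intro ra s hs
    rw [PySem.List.enumerate_cons, List.foldl_cons]
    have hinit : ([((s : Int), c).1 + 1] : List Int) = pvIdeal (c :: ra) v 0 := by
      simp [pvIdeal, pvEd, hs]
    have hrow :
        (PySem.List.enumerate v 0).foldl
          (fun cur q =>
            cur ++ [min (min (PySem.List.pyGetD (pvIdeal ra v v.length) (q.1 + 1) 0 + 1) (PySem.List.pyGetD cur q.1 0 + 1)) (PySem.List.pyGetD (pvIdeal ra v v.length) q.1 0 + cf c q.2)])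
          [((s : Int), c).1 + 1]
        = pvIdeal (c :: ra) v v.length := by
      rw [hinit]
      have := pvInner cf hcf v ra c v [] (by simp)
      simpa using this
    rw [hrow]
    rw [ih (c :: ra) (s + 1) (by simp [hs])]
    simp

lemma pvIdeal_last (w v : List Char) :
    PySem.List.pyGetD (pvIdeal w v v.length) (-1) 0 = pvEd w v.reverse := by
  rw [pvIdeal, List.range_succ, List.map_append]
  rw [List.map_singleton, PySem.List.pyGetD_neg_one_append_singleton]
  simp

lemma pvDP (cf : Char → Char → Int) (hcf : ∀ x y, cf x y = if x ≠ y then (1 : Int) else 0)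
    (u v : List Char) :
    PySem.List.pyGetD
      ((PySem.List.enumerate u 0).foldl
        (fun prev p =>
          (PySem.List.enumerate v 0).foldl
            (fun cur q =>
              cur ++ [min (min (PySem.List.pyGetD prev (q.1 + 1) 0 + 1) (PySem.List.pyGetD cur q.1 0 + 1)) (PySem.List.pyGetD prev q.1 0 + cf p.2 q.2)])
            [p.1 + 1])
        (PySem.List.pyRange 0 ((v.length : Int) + 1) 1)) (-1) 0
    = pvEd u.reverse v.reverse := by
  rw [pvIdeal_init]
  rw [pvOuter cf hcf v u [] 0 (by simp)]
  simpa using pvIdeal_last u.reverse v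

lemma pvLevA_noswap (a b : List Char) (h : ¬ a.length < b.length) :
    pvLevA a b = pvEd a.reverse b.reverse := by
  rw [pvLevA]
  rw [dif_neg h]
  by_cases hb : b.length = 0
  · rw [if_pos hb]
    have : b = [] := List.length_eq_zero_iff.mp hb
    subst this
    simp [pvEd_nil_right]
  · rw [if_neg hb]
    exact pvDP (fun x y => if x ≠ y then (1 : Int) else 0) (fun _ _ => rfl) a b

lemma pvLevA_eq (a b : List Char) : pvLevA a b = pvEd a.reverse b.reverse := by
  by_cases h : a.length < b.length
  · rw [pvLevA, dif_pos h, pvLevA_noswap b a (by omega), pvEd_symm]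
  · exact pvLevA_noswap a b h

lemma pvLevB_eq (a b : List Char) : pvLevB a b = pvEd a.reverse b.reverse := by
  rw [pvLevB]
  have := pvDP (fun x y => if y ≠ x then (1 : Int) else 0)
      (fun x y => by by_cases h : x = y <;> simp [h, Ne, eq_comm]) b a
  rw [this, pvEd_symm]

-- head of stable insertion sort vs running first-minimum
def pvHStep {E : Type} (h : Option (E × Int)) (x : E × Int) : Option (E × Int) :=
  match h with
  | none => some x
  | some y => if x.2 < y.2 then some x else some y

lemma pvInsertBy_head {E : Type} (x : E × Int) (s : List (E × Int)) :
    (PySem.List.insertBy (fun a b => decide (a.2 < b.2)) x s).head? = pvHStep s.head? x := by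
  cases s with
  | nil => simp [PySem.List.insertBy, pvHStep]
  | cons y ys =>
    rw [PySem.List.insertBy]
    by_cases h : x.2 < y.2 <;> simp [h, pvHStep]

lemma pvSortHead {E : Type} (l : List (E × Int)) :
    ∀ (s : List (E × Int)),
    (l.foldl (fun acc x => PySem.List.insertBy (fun a b => decide (a.2 < b.2)) x acc) s).head?
    = l.foldl pvHStep s.head? := by
  induction l with
  | nil => intro s; simp
  | cons x t ih =>
    intro s
    rw [List.foldl_cons, List.foldl_cons, ih, pvInsertBy_head]

lemma pvFoldBest {E : Type} (d : E → Int) (l : List E) :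
    ∀ (h0 : Option (E × Int)), (∀ m, h0 = some m → m.2 = d m.1) →
    l.foldl
      (fun (st : Option E × Option Int) e =>
        if st.2.isNone ∨ d e < st.2.getD 0 then (some e, some (d e)) else st)
      (Option.map Prod.fst h0, Option.map Prod.snd h0)
    = ((Option.map Prod.fst ((l.map (fun e => (e, d e))).foldl pvHStep h0)), (Option.map Prod.snd ((l.map (fun e => (e, d e))).foldl pvHStep h0))) := by
  induction l with
  | nil => intro h0 _; simp
  | cons e t ih =>
    intro h0 hinv
    rw [List.foldl_cons, List.map_cons, List.foldl_cons]
    cases h0 with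
    | none =>
      have hstep : pvHStep (none : Option (E × Int)) (e, d e) = some (e, d e) := rfl
      rw [hstep]
      have hcond : (((Option.map Prod.snd (none : Option (E × Int))).isNone : Prop) ∨ d e < (Option.map Prod.snd (none : Option (E × Int))).getD 0) := by simp
      rw [if_pos hcond]
      have := ih (some (e, d e)) (by intro m hm; cases hm; rfl)
      simpa using this
    | some m =>
      have hm2 : m.2 = d m.1 := hinv m rfl
      have hstep : pvHStep (some m) (e, d e) = if d e < m.2 then some (e, d e) else some m := rfl
      rw [hstep]
      by_cases hlt : d e < m.2
      · rw [if_pos hlt]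
        rw [if_pos (by simpa using hlt)]
        have := ih (some (e, d e)) (by intro m' hm'; cases hm'; rfl)
        simpa using this
      · rw [if_neg hlt]
        rw [if_neg (by simpa using hlt)]
        have := ih (some m) (by intro m' hm'; cases hm'; exact hm2)
        simpa using this

lemma pvSel {E : Type} [DecidableEq E] (e0 : E) (d : E → Int) (l : List E) (t : Int) :
    (if PySem.List.sorted (l.map (fun e => (e, d e))) (fun x => x.2) false ≠ [] ∧ (PySem.List.pyGetD (PySem.List.sorted (l.map (fun e => (e, d e))) (fun x => x.2) false) 0 (e0, 0)).2 ≤ t then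
      some (PySem.List.pyGetD (PySem.List.sorted (l.map (fun e => (e, d e))) (fun x => x.2) false) 0 (e0, 0)).1
     else none)
    = (if ((l.foldl
          (fun (st : Option E × Option Int) e =>
            if st.2.isNone ∨ d e < st.2.getD 0 then (some e, some (d e)) else st)
          ((none, none) : Option E × Option Int)).1.isSome : Prop) ∧ (l.foldl
          (fun (st : Option E × Option Int) e =>
            if st.2.isNone ∨ d e < st.2.getD 0 then (some e, some (d e)) else st)
          ((none, none) : Option E × Option Int)).2.getD 0 ≤ t then
        (l.foldl
          (fun (st : Option E × Option Int) e =>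
            if st.2.isNone ∨ d e < st.2.getD 0 then (some e, some (d e)) else st)
          ((none, none) : Option E × Option Int)).1
       else none) := by
  have hA : (PySem.List.sorted (l.map (fun e => (e, d e))) (fun x => x.2) false).head?
      = (l.map (fun e => (e, d e))).foldl pvHStep none := by
    rw [PySem.List.sorted_eq_foldl_insertBy]
    simpa using pvSortHead (l.map (fun e => (e, d e))) []
  have hB := pvFoldBest d l none (by intro m hm; cases hm)
  simp only [Option.map_none] at hB
  rw [hB]
  cases hh : (l.map (fun e => (e, d e))).foldl pvHStep none with
  | none =>
    rw [hh] at hA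
    have hnil : PySem.List.sorted (l.map (fun e => (e, d e))) (fun x => x.2) false = [] :=
      List.head?_eq_none_iff.mp hA
    rw [hnil]
    simp
  | some m =>
    rw [hh] at hA
    obtain ⟨rest, hrest⟩ : ∃ rest, PySem.List.sorted (l.map (fun e => (e, d e))) (fun x => x.2) false = m :: rest := by
      cases hs : PySem.List.sorted (l.map (fun e => (e, d e))) (fun x => x.2) false with
      | nil => rw [hs] at hA; simp at hA
      | cons a b => rw [hs] at hA; simp at hA; exact ⟨b, by rw [hA]⟩
    rw [hrest]
    have hget : PySem.List.pyGetD (m :: rest) 0 (e0, 0) = m := by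
      simp [PySem.List.pyGetD_zero_cons]
    rw [hget]
    by_cases hle : m.2 ≤ t
    · rw [if_pos (by exact ⟨by simp, hle⟩), if_pos (by simpa using hle)]
      simp
    · rw [if_neg (by intro h; exact hle h.2), if_neg (by intro h; exact hle (by simpa using h.2))]

lemma pvSelFull {E : Type} [DecidableEq E] (e0 : E) (P : E → Bool) (d : E → Int) (l : List E) (t : Int) :
    (if PySem.List.sorted (l.foldl (fun acc e => if P e then acc ++ [(e, d e)] else acc) []) (fun x => x.2) false ≠ [] ∧ (PySem.List.pyGetD (PySem.List.sorted (l.foldl (fun acc e => if P e then acc ++ [(e, d e)] else acc) []) (fun x => x.2) false) 0 (e0, 0)).2 ≤ t then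
      some (PySem.List.pyGetD (PySem.List.sorted (l.foldl (fun acc e => if P e then acc ++ [(e, d e)] else acc) []) (fun x => x.2) false) 0 (e0, 0)).1
     else none)
    = (if ((l.foldl
          (fun (st : Option E × Option Int) e =>
            if P e then (if st.2.isNone ∨ d e < st.2.getD 0 then (some e, some (d e)) else st) else st)
          ((none, none) : Option E × Option Int)).1.isSome : Prop) ∧ (l.foldl
          (fun (st : Option E × Option Int) e =>
            if P e then (if st.2.isNone ∨ d e < st.2.getD 0 then (some e, some (d e)) else st) else st)
          ((none, none) : Option E × Option Int)).2.getD 0 ≤ t then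
        (l.foldl
          (fun (st : Option E × Option Int) e =>
            if P e then (if st.2.isNone ∨ d e < st.2.getD 0 then (some e, some (d e)) else st) else st)
          ((none, none) : Option E × Option Int)).1
       else none) := by
  rw [PySem.List.foldl_append_if P (fun e => (e, d e)), PySem.List.foldl_if_eq_foldl_filter P]
  simpa using pvSel e0 d (l.filter P) t

-- ===== VERDICT (by name: the statement is the Claim_ definition above) =====
theorem fuzzy_match_address_spec : Claim_equal_fuzzy_match_address := by
  intro address known_addresses threshold _
  unfold Spec_fuzzy_match_address
  unfold fuzzy_match_address fuzzy_match_address_alt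
  simp only [pvLevA_eq, pvLevB_eq]
  exact pvSelFull []
    (fun entry => PySem.Dict.contains (PySem.Dict.mk entry) "address")
    (fun entry => pvEd address.toList.reverse ((PySem.Dict.getD (PySem.Dict.mk entry) "address" "").toList.reverse))
    known_addresses threshold
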